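-- pv_equiv track=rewrite | github.com/alexetsnyder/OuroborosPython | Misc/choose_lunch.py | get_nth_word
-- ===== SOURCE A (Python) =====
-- def get_nth_word(sample_week, n):
-- 	word = ''
-- 	count = 0
-- 	clean_sample_week = sample_week[3:].strip()
-- 	for i in range(len(clean_sample_week)):
-- 		if clean_sample_week[i] == '#':
-- 			if count == n:
-- 				return word.strip()
-- 			count += 1
-- 			word = ''
-- 		else:
-- 			word += clean_sample_week[i]
-- 	return word
-- ===== SOURCE B (Python) =====
-- def get_nth_word(sample_week, n):
--     parts = sample_week[3:].strip().split('#')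
--     if 0 <= n < len(parts) - 1:
--         return parts[n].strip()
--     return parts[-1]
-- ===== Notes on version B (the rewrite author's own statement) =====
-- stated objective: simpler
-- what changed: A's fused single scan with a character accumulator, '#'-counter and early return is replaced by splitting the cleaned string into the full field list once and selecting the field by index (stripped when 0 <= n < len(parts)-1, otherwise the last field unstripped). (same O(n) pass, but done by the built-in split instead of per-character Python bytecode)
import Mathlib
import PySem

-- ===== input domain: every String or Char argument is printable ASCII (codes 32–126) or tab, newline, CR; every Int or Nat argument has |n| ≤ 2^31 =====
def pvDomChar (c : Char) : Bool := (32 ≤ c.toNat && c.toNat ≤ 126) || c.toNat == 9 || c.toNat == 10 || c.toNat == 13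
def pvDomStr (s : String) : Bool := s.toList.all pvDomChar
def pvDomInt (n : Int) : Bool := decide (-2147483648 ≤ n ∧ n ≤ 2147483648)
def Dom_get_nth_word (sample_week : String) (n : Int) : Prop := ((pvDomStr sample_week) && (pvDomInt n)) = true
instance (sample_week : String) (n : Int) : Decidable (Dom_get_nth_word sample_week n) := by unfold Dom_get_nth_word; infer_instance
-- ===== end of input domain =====

-- B replaces A's fused char-by-char scan (accumulator + '#'-counter + early return)
-- by splitting the cleaned string into the full field list once and selecting by index (objective: simpler).

-- ===== PORT A =====
-- A's for-loop over clean_sample_week with `word`/`count` state and an early return,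
-- transliterated as structural recursion over the remaining characters.
def getNthWordLoop (cs : List Char) (word : List Char) (count : Int) (n : Int) : List Char :=
  match cs with
  | [] => word
  | c :: rest =>
    if c = '#' then
      if count = n then PySem.Chars.strip word
      else getNthWordLoop rest [] (count + 1) n
    else getNthWordLoop rest (word ++ [c]) count n

def get_nth_word (sample_week : String) (n : Int) : String :=
  let clean := PySem.Chars.strip (PySem.List.slice sample_week.toList (some 3) none)
  String.ofList (getNthWordLoop clean [] 0 n)

-- ===== PORT B =====
-- Source B: parts = sample_week[3:].strip().split('#'); indexed selection.
-- .split('#') (one-char separator, empty pieces kept) is ported as List.splitOnP (· == '#').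
def get_nth_word_alt (sample_week : String) (n : Int) : String :=
  let clean := PySem.Chars.strip (PySem.List.slice sample_week.toList (some 3) none)
  let parts := clean.splitOnP (· == '#')
  if 0 ≤ n ∧ n < (parts.length : Int) - 1 then
    String.ofList (PySem.Chars.strip (parts.getD n.toNat []))
  else
    String.ofList (parts.getLastD [])

-- ===== PRECONDITION & SPEC =====
def Spec_get_nth_word (sample_week : String) (n : Int) (out : String) : Prop := out = get_nth_word_alt sample_week n
instance (sample_week : String) (n : Int) (out : String) : Decidable (Spec_get_nth_word sample_week n out) := by unfold Spec_get_nth_word; infer_instance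

-- ===== CLAIM (what is proved, stated in full; the proofs are below) =====
def Claim_equal_get_nth_word : Prop := ∀ (sample_week : String) (n : Int), Dom_get_nth_word sample_week n → Spec_get_nth_word sample_week n (get_nth_word sample_week n)

-- ===== LEMMAS AND PROOFS =====

-- The loop with accumulator `word` (free of '#') and counter `count` computes the
-- indexed selection over the split of `word ++ cs`.
theorem getNthWordLoop_eq (cs : List Char) : ∀ (word : List Char) (count n : Int),
    (∀ x ∈ word, ¬ (x == '#') = true) →
    getNthWordLoop cs word count n =
      (let parts := (word ++ cs).splitOnP (· == '#')
       if count ≤ n ∧ n - count < (parts.length : Int) - 1 then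
         PySem.Chars.strip (parts.getD (n - count).toNat [])
       else parts.getLastD []) := by
  induction cs with
  | nil =>
    intro word count n hw
    simp only [getNthWordLoop, List.append_nil, List.splitOnP_eq_single _ _ hw]
    split_ifs with h
    · exfalso; simp only [List.length_cons, List.length_nil] at h; push_cast at h; omega
    · simp
  | cons c rest ih =>
    intro word count n hw
    by_cases hc : c = '#'
    · subst hc
      simp only [getNthWordLoop]
      rw [List.splitOnP_first (· == '#') word hw '#' rfl rest]
      by_cases hcn : count = n
      · subst hcn
        have hpos : 0 < ((rest.splitOnP (· == '#')).length : Int) :=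
          by exact_mod_cast List.length_pos_iff.mpr (List.splitOnP_ne_nil _ _)
        have hcond : count ≤ count ∧ count - count < ((word :: rest.splitOnP (· == '#')).length : Int) - 1 := by
          simp only [List.length_cons]; push_cast; omega
        rw [if_pos rfl, if_pos hcond]
        simp
      · simp only [if_neg hcn]
        rw [ih [] (count + 1) n (by simp)]
        simp only [List.nil_append, List.length_cons]
        set ps := rest.splitOnP (· == '#') with hps
        have hlen : 0 < ps.length := List.length_pos_iff.mpr (List.splitOnP_ne_nil _ _)
        by_cases h1 : count + 1 ≤ n ∧ n - (count + 1) < (ps.length : Int) - 1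
        · rw [if_pos h1, if_pos (by push_cast; omega : count ≤ n ∧ n - count < ((ps.length + 1 : Nat) : Int) - 1)]
          have hidx : (n - count).toNat = (n - (count + 1)).toNat + 1 := by omega
          simp [hidx]
        · have h2 : ¬ (count ≤ n ∧ n - count < ((ps.length + 1 : Nat) : Int) - 1) := by
            push_cast; omega
          rw [if_neg h1, if_neg h2]
          rcases ps with _ | ⟨p, ps'⟩
          · exact absurd hlen (by simp)
          · simp
    · have hc' : ¬ (c == '#') = true := by simpa using hc
      simp only [getNthWordLoop, if_neg hc]
      rw [ih (word ++ [c]) count n (by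
        intro x hx
        rcases List.mem_append.mp hx with h | h
        · exact hw x h
        · simp at h; subst h; exact hc')]
      simp

set_option maxHeartbeats 1000000 in
theorem get_nth_word_spec' (sample_week : String) (n : Int) :
    get_nth_word sample_week n = get_nth_word_alt sample_week n := by
  unfold get_nth_word get_nth_word_alt
  dsimp only
  rw [getNthWordLoop_eq _ [] 0 n (by simp)]
  rw [apply_ite String.ofList]
  simp only [List.nil_append, Int.sub_zero]

-- ===== VERDICT (by name: the statement is the Claim_ definition above) =====
set_option maxHeartbeats 1000000 in
theorem get_nth_word_spec : Claim_equal_get_nth_word := by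
  intro s n _
  unfold Spec_get_nth_word
  exact (get_nth_word_spec' s n)
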